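-- pv_equiv track=rewrite | github.com/autoas/as | tools/generator/Dcm.py | get_acs
-- ===== SOURCE A (Python) =====
-- def get_acs(attrs):
--     access = []
--     sessions = []
--     securities = []
--     for k, v in attrs.items():
--         if k.startswith("access"):
--             if v == "Y":
--                 access.append(k[7:])
--         elif k.startswith("sessions"):
--             if v == "Y":
--                 sessions.append(k[9:])
--         elif k.startswith("securities"):
--             if v == "Y":
--                 securities.append(k[11:])
--     return access, sessions, securities
-- ===== SOURCE B (Python) =====
-- def _pick(attrs, prefix, off):
--     return [k[off:] for k, v in attrs.items() if k.startswith(prefix) and v == "Y"]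
--
--
-- def get_acs(attrs):
--     return (_pick(attrs, "access", 7),
--             _pick(attrs, "sessions", 9),
--             _pick(attrs, "securities", 11))
-- ===== Notes on version B (the rewrite author's own statement) =====
-- stated objective: simpler
-- what changed: Replaces the single loop with a mutable elif chain over three accumulators by one generic filtered-comprehension helper applied three times, once per prefix (the three prefixes are mutually exclusive, so three independent scans give the same partition and order).
import Mathlib
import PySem

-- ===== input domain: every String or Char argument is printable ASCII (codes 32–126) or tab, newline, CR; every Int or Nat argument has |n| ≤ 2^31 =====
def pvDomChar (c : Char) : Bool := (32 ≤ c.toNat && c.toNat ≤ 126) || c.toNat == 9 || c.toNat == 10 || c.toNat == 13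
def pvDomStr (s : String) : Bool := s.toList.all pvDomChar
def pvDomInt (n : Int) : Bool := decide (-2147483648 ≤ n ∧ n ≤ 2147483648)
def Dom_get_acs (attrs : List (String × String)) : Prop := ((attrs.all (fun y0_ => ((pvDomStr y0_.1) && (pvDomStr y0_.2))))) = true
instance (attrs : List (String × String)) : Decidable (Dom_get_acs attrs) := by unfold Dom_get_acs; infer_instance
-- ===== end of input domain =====

-- ===== PORT A =====
-- Literal port of A: one fold over the items, an elif chain appending to three accumulators.
def get_acs (attrs : List (String × String)) : List String × List String × List String :=
  attrs.foldl (fun st kv =>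
    if PySem.Str.startswith kv.1 "access" then
      (if kv.2 = "Y" then (st.1 ++ [PySem.Str.slice kv.1 (some 7) none], st.2.1, st.2.2) else st)
    else if PySem.Str.startswith kv.1 "sessions" then
      (if kv.2 = "Y" then (st.1, st.2.1 ++ [PySem.Str.slice kv.1 (some 9) none], st.2.2) else st)
    else if PySem.Str.startswith kv.1 "securities" then
      (if kv.2 = "Y" then (st.1, st.2.1, st.2.2 ++ [PySem.Str.slice kv.1 (some 11) none]) else st)
    else st) ([], [], [])

-- ===== PORT B =====
-- B: one generic filtered pass per prefix (port of Source B's _pick helper), applied three times.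
def pickAcs (attrs : List (String × String)) (prefix_ : String) (off : Int) : List String :=
  attrs.filterMap (fun kv =>
    if PySem.Str.startswith kv.1 prefix_ && kv.2 == "Y" then
      some (PySem.Str.slice kv.1 (some off) none)
    else none)

def get_acs_alt (attrs : List (String × String)) : List String × List String × List String :=
  (pickAcs attrs "access" 7, pickAcs attrs "sessions" 9, pickAcs attrs "securities" 11)

-- ===== PRECONDITION & SPEC =====
def Spec_get_acs (attrs : List (String × String)) (out : List String × List String × List String) : Prop := out = get_acs_alt attrs
instance (attrs : List (String × String)) (out : List String × List String × List String) : Decidable (Spec_get_acs attrs out) := by unfold Spec_get_acs; infer_instance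

-- ===== CLAIM (what is proved, stated in full; the proofs are below) =====
def Claim_equal_get_acs : Prop := ∀ (attrs : List (String × String)), Dom_get_acs attrs → Spec_get_acs attrs (get_acs attrs)

-- ===== LEMMAS AND PROOFS =====

-- the three prefixes are mutually exclusive
lemma chars_not_startswith (k p q : List Char)
    (hpq : ¬ (p <+: q) ∧ ¬ (q <+: p))
    (h : PySem.Chars.startswith k p = true) : PySem.Chars.startswith k q = false := by
  by_contra hq
  rw [Bool.not_eq_false] at hq
  rw [PySem.Chars.startswith_iff] at h hq
  rcases List.prefix_or_prefix_of_prefix h hq with h1 | h1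
  · exact hpq.1 h1
  · exact hpq.2 h1

lemma foldl_get_acs (attrs : List (String × String)) (a s c : List String) :
    attrs.foldl (fun st kv =>
      if PySem.Str.startswith kv.1 "access" then
        (if kv.2 = "Y" then (st.1 ++ [PySem.Str.slice kv.1 (some 7) none], st.2.1, st.2.2) else st)
      else if PySem.Str.startswith kv.1 "sessions" then
        (if kv.2 = "Y" then (st.1, st.2.1 ++ [PySem.Str.slice kv.1 (some 9) none], st.2.2) else st)
      else if PySem.Str.startswith kv.1 "securities" then
        (if kv.2 = "Y" then (st.1, st.2.1, st.2.2 ++ [PySem.Str.slice kv.1 (some 11) none]) else st)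
      else st) (a, s, c)
    = (a ++ pickAcs attrs "access" 7, s ++ pickAcs attrs "sessions" 9,
       c ++ pickAcs attrs "securities" 11) := by
  induction attrs generalizing a s c with
  | nil => simp [pickAcs]
  | cons kv rest ih =>
    obtain ⟨k, v⟩ := kv
    simp only [pickAcs] at ih ⊢
    simp at ih
    by_cases h1 : PySem.Chars.startswith k.toList ['a','c','c','e','s','s'] = true
    · have h2 := chars_not_startswith k.toList ['a','c','c','e','s','s']
        ['s','e','s','s','i','o','n','s'] (by decide) h1
      have h3 := chars_not_startswith k.toList ['a','c','c','e','s','s']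
        ['s','e','c','u','r','i','t','i','e','s'] (by decide) h1
      by_cases hv : v = "Y" <;> simp [h1, h2, h3, hv, ih]
    · by_cases h2 : PySem.Chars.startswith k.toList ['s','e','s','s','i','o','n','s'] = true
      · have h3 := chars_not_startswith k.toList ['s','e','s','s','i','o','n','s']
          ['s','e','c','u','r','i','t','i','e','s'] (by decide) h2
        by_cases hv : v = "Y" <;> simp [h1, h2, h3, hv, ih]
      · by_cases h3 : PySem.Chars.startswith k.toList ['s','e','c','u','r','i','t','i','e','s'] = true <;>
          by_cases hv : v = "Y" <;> simp [h1, h2, h3, hv, ih]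

-- ===== VERDICT (by name: the statement is the Claim_ definition above) =====
theorem get_acs_spec : Claim_equal_get_acs := by
  intro attrs _
  show get_acs attrs = get_acs_alt attrs
  unfold get_acs get_acs_alt
  simpa using foldl_get_acs attrs [] [] []
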